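-- pv_equiv track=rewrite | github.com/jschuringa/twodice | search/search.py | cultureMatch
-- ===== SOURCE A (Python) =====
-- import operator
--
-- def cultureMatch(userCulture, compCultureDict):
--     cultureMatchDict = {}
--     for key in compCultureDict:
--         cultureScore = 0
--         value=compCultureDict[key]
--         cultureScore = cultureMatchSingle(userCulture, value)
--         cultureMatchDict[key] = cultureScore
--
--     sortedList = sorted(cultureMatchDict.items(), key=operator.itemgetter(1))
--     return dict(sortedList)
--
-- def cultureMatchSingle(userCulture, studCulture):
--     cultureScore = 0
--     for i in range(0, len(userCulture)):
--         for j in range(0, len(studCulture)):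
--             if userCulture[i] == studCulture[j]:
--                 cultureScore += abs(i - j)
--     cultureScore = 100 - cultureScore * 2
--     return cultureScore
-- ===== SOURCE B (Python) =====
-- def cultureMatch(userCulture, compCultureDict):
--     # Index userCulture once: value -> list of positions. Each company is then
--     # scored by scanning only its own list and the matching positions, instead
--     # of A's full cross-product of the two lists.
--     pos = {}
--     for i, c in enumerate(userCulture):
--         pos.setdefault(c, []).append(i)
--     scored = [(key, cultureMatchSingle_idx(pos, stud)) for key, stud in compCultureDict.items()]
--     scored.sort(key=lambda kv: kv[1])
--     return dict(scored)
--
-- def cultureMatchSingle_idx(pos, studCulture):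
--     total = 0
--     for j, s in enumerate(studCulture):
--         for i in pos.get(s, []):
--             total += abs(i - j)
--     return 100 - 2 * total
-- ===== Notes on version B (the rewrite author's own statement) =====
-- stated objective: faster
-- what changed: B builds a position index of userCulture (value -> list of indices) once and scores each company by looking up only the matching positions, instead of A's full nested scan of userCulture x studCulture per company; ties and order are unchanged (same stable sort by score).
import Mathlib
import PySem

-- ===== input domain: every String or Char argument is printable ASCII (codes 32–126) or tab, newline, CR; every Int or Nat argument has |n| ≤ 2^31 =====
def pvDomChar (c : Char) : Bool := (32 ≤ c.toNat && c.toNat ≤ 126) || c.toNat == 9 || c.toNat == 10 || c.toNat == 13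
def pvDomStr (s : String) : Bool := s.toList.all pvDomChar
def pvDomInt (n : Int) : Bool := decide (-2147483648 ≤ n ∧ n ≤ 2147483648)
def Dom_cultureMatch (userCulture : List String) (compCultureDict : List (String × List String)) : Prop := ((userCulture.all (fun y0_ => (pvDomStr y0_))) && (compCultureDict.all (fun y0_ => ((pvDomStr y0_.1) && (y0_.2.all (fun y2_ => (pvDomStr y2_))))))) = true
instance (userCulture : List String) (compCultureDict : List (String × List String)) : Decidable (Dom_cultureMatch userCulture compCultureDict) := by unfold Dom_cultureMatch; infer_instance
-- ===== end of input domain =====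

-- B replaces A's per-company cross-product scan with a one-pass position index of
-- userCulture; same scores, same stable sort, same returned dict.

-- ===== PORT A =====
def cultureMatchSingle (userCulture studCulture : List String) : Int :=
  let cultureScore : Int :=
    (PySem.List.pyRange 0 (PySem.List.len userCulture) 1).foldl (fun acc i =>
      (PySem.List.pyRange 0 (PySem.List.len studCulture) 1).foldl (fun acc j =>
        if PySem.List.pyGetD userCulture i "" = PySem.List.pyGetD studCulture j ""
        then acc + |i - j| else acc) acc) 0
  100 - cultureScore * 2

def cultureMatch (userCulture : List String) (compCultureDict : List (String × List String)) : List (String × Int) :=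
  -- 'for key in compCultureDict: value = compCultureDict[key]; …' — the input is a
  -- Python dict (keys distinct, see Pre_), so iterating its keys is iterating the pairs.
  let cultureMatchDict : PySem.Dict String Int :=
    compCultureDict.foldl (fun d kv =>
      d.insert kv.1 (cultureMatchSingle userCulture
        ((PySem.Dict.mk compCultureDict).getD kv.1 []))) PySem.Dict.empty
  let sortedList := PySem.List.sorted cultureMatchDict.items (fun kv => kv.2)
  -- dict(sortedList)
  (sortedList.foldl (fun (d : PySem.Dict String Int) kv => d.insert kv.1 kv.2) PySem.Dict.empty).items

-- ===== PORT B =====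
-- pos.setdefault(c, []).append(i): d[c] = d.get(c, []) + [i] (same dict effect)
def cmPosIndex (userCulture : List String) : PySem.Dict String (List Int) :=
  (PySem.List.enumerate userCulture).foldl
    (fun d ic => d.modify ic.2 [] (· ++ [ic.1])) PySem.Dict.empty

def cultureMatchSingle_idx (pos : PySem.Dict String (List Int)) (studCulture : List String) : Int :=
  let total : Int :=
    (PySem.List.enumerate studCulture).foldl (fun acc js =>
      (pos.getD js.2 []).foldl (fun a i => a + |i - js.1|) acc) 0
  100 - 2 * total

def cultureMatch_alt (userCulture : List String) (compCultureDict : List (String × List String)) : List (String × Int) :=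
  let pos := cmPosIndex userCulture
  -- [(key, score(stud)) for key, stud in compCultureDict.items()] (keys distinct, see Pre_)
  let scored := compCultureDict.map (fun kv => (kv.1, cultureMatchSingle_idx pos kv.2))
  let sortedList := PySem.List.sorted scored (fun kv => kv.2)
  (sortedList.foldl (fun (d : PySem.Dict String Int) kv => d.insert kv.1 kv.2) PySem.Dict.empty).items

-- ===== PRECONDITION & SPEC =====
-- Pre_: the keys of compCultureDict are pairwise distinct — it models a Python dict,
-- so no Python call to A can present duplicate keys; nothing A returns on is excluded.
def Pre_cultureMatch (userCulture : List String) (compCultureDict : List (String × List String)) : Prop :=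
  (compCultureDict.map (fun kv => kv.1)).Nodup
instance (userCulture : List String) (compCultureDict : List (String × List String)) : Decidable (Pre_cultureMatch userCulture compCultureDict) := by unfold Pre_cultureMatch; infer_instance

def pvWitness_cultureMatch : List String × (List (String × List String)) :=
  (["a", "b"], [("X", ["b", "a"]), ("Y", ["a"])])

def Spec_cultureMatch (userCulture : List String) (compCultureDict : List (String × List String)) (out : List (String × Int)) : Prop := out = cultureMatch_alt userCulture compCultureDict
instance (userCulture : List String) (compCultureDict : List (String × List String)) (out : List (String × Int)) : Decidable (Spec_cultureMatch userCulture compCultureDict out) := by unfold Spec_cultureMatch; infer_instance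

-- ===== CLAIM (what is proved, stated in full; the proofs are below) =====
def Claim_equal_cultureMatch : Prop := ∀ (userCulture : List String) (compCultureDict : List (String × List String)), Dom_cultureMatch userCulture compCultureDict → Pre_cultureMatch userCulture compCultureDict → Spec_cultureMatch userCulture compCultureDict (cultureMatch userCulture compCultureDict)

-- ===== LEMMAS AND PROOFS =====

-- double sums over lists commute
theorem pv_sum_comm {α β : Type} (l1 : List α) (l2 : List β) (f : α → β → Int) :
    (l1.map (fun x => (l2.map (f x)).sum)).sum
      = (l2.map (fun y => (l1.map (fun x => f x y)).sum)).sum := by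
  induction l1 with
  | nil => simp
  | cons a t ih =>
      have hadd : ∀ (l : List β) (g h : β → Int),
          (l.map (fun y => g y + h y)).sum = (l.map g).sum + (l.map h).sum := by
        intro l g h
        induction l with
        | nil => simp
        | cons b tb ihb => simp only [List.map_cons, List.sum_cons, ihb]; ring
      simp only [List.map_cons, List.sum_cons, ih, hadd]

-- a sum over a filtered list is a sum of an if-then-else over the whole list
theorem pv_sum_filter {α : Type} (l : List α) (p : α → Bool) (h : α → Int) :
    ((l.filter p).map h).sum = (l.map (fun x => if p x then h x else 0)).sum := by
  induction l with
  | nil => simp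
  | cons a t ih =>
      by_cases hp : p a <;> simp [hp, ih]

-- the index built by B lists exactly the positions of s in userCulture, in order
theorem pv_posIndex_getD (userCulture : List String) (s : String) :
    (cmPosIndex userCulture).getD s []
      = ((PySem.List.enumerate userCulture).filter (fun ic => ic.2 == s)).map (fun ic => ic.1) := by
  unfold cmPosIndex
  have h := PySem.Dict.getD_foldl_modify_append
    ((PySem.List.enumerate userCulture).map (fun ic => (ic.2, ic.1)))
    (PySem.Dict.empty (κ := String) (ν := List Int)) s
  simpa [List.foldl_map, List.filter_map, List.map_map, Function.comp] using h

-- per-company score: A's nested scan equals B's index lookup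
theorem pv_single_eq (userCulture studCulture : List String) (pos : PySem.Dict String (List Int))
    (hpos : pos = cmPosIndex userCulture) :
    cultureMatchSingle userCulture studCulture = cultureMatchSingle_idx pos studCulture := by
  subst hpos
  unfold cultureMatchSingle cultureMatchSingle_idx
  have hA : ∀ (l : List Int) (i : Int) (acc : Int),
      l.foldl (fun acc j =>
        if PySem.List.pyGetD userCulture i "" = PySem.List.pyGetD studCulture j ""
        then acc + |i - j| else acc) acc
      = acc + (l.map (fun j =>
          if PySem.List.pyGetD userCulture i "" = PySem.List.pyGetD studCulture j ""
          then |i - j| else 0)).sum := by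
    intro l i acc
    rw [PySem.List.foldl_congr_mem l _
      (fun acc j => acc + (if PySem.List.pyGetD userCulture i "" = PySem.List.pyGetD studCulture j "" then |i - j| else 0))
      acc (by
        intro a x _
        by_cases h : PySem.List.pyGetD userCulture i "" = PySem.List.pyGetD studCulture x "" <;>
          simp [h])]
    exact PySem.List.foldl_add _ _ _
  have hB : ∀ (l : List (Int × String)) (acc : Int),
      l.foldl (fun acc js => ((cmPosIndex userCulture).getD js.2 []).foldl (fun a i => a + |i - js.1|) acc) acc
      = acc + (l.map (fun js => (((cmPosIndex userCulture).getD js.2 []).map (fun i => |i - js.1|)).sum)).sum := by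
    intro l acc
    rw [PySem.List.foldl_congr_mem l _
      (fun acc js => acc + (((cmPosIndex userCulture).getD js.2 []).map (fun i => |i - js.1|)).sum)
      acc (by intro a x _; exact PySem.List.foldl_add _ _ _)]
    exact PySem.List.foldl_add _ _ _
  -- turn the outer folds into sums as well
  rw [PySem.List.foldl_congr_mem _ _
      (fun acc i => acc + ((PySem.List.pyRange 0 (PySem.List.len studCulture) 1).map (fun j =>
          if PySem.List.pyGetD userCulture i "" = PySem.List.pyGetD studCulture j ""
          then |i - j| else 0)).sum) 0 (by intro a x _; exact hA _ _ _),
    PySem.List.foldl_add, hB]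
  have hsum :
      ((PySem.List.pyRange 0 (PySem.List.len userCulture) 1).map (fun i =>
          ((PySem.List.pyRange 0 (PySem.List.len studCulture) 1).map (fun j =>
            if PySem.List.pyGetD userCulture i "" = PySem.List.pyGetD studCulture j ""
            then |i - j| else 0)).sum)).sum
      = ((PySem.List.enumerate studCulture).map (fun js =>
          (((cmPosIndex userCulture).getD js.2 []).map (fun i => |i - js.1|)).sum)).sum := by
    rw [pv_sum_comm]
    simp only [pv_posIndex_getD, List.map_map, pv_sum_filter,
      PySem.List.enumerate_eq_map_pyRange studCulture "",
      PySem.List.enumerate_eq_map_pyRange userCulture ""]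
    simp [Function.comp_def, beq_iff_eq]
  simp only [zero_add]
  rw [hsum]
  ring

-- A's dict-building loop produces exactly B's scored list (fresh distinct keys append)
theorem pv_dict_build (userCulture : List String) (compCultureDict : List (String × List String))
    (hnd : (compCultureDict.map (fun kv => kv.1)).Nodup) :
    (compCultureDict.foldl (fun d kv =>
      d.insert kv.1 (cultureMatchSingle userCulture
        ((PySem.Dict.mk compCultureDict).getD kv.1 []))) PySem.Dict.empty).items
    = compCultureDict.map (fun kv => (kv.1, cultureMatchSingle userCulture kv.2)) := by
  rw [PySem.Dict.items_foldl_insert_fresh compCultureDict (fun kv => kv.1)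
      (fun kv => cultureMatchSingle userCulture ((PySem.Dict.mk compCultureDict).getD kv.1 []))
      PySem.Dict.empty (by intro a _; simp) hnd]
  rw [show (PySem.Dict.empty : PySem.Dict String Int).items = [] from rfl]
  simp only [List.nil_append]
  apply List.map_congr_left
  intro kv hkv
  have : (PySem.Dict.mk compCultureDict).getD kv.1 [] = kv.2 := by
    apply PySem.Dict.getD_of_mem_items (d := PySem.Dict.mk compCultureDict)
      (k := kv.1) (v := kv.2) (by simpa using hkv) (by simpa [PySem.Dict.keys] using hnd)
  rw [this]

-- ===== VERDICT (by name: the statement is the Claim_ definition above) =====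
theorem cultureMatch_spec : Claim_equal_cultureMatch := by
  intro userCulture compCultureDict _hdom hpre
  unfold Spec_cultureMatch cultureMatch cultureMatch_alt
  dsimp only
  rw [pv_dict_build userCulture compCultureDict hpre]
  congr 2
  congr 1
  apply List.map_congr_left
  intro kv _
  exact congrArg (fun z => (kv.1, z)) (pv_single_eq userCulture kv.2 _ rfl)
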